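-- pv_equiv track=rewrite | github.com/neliodass/InzynieriaOprogramowania-PlanDlaPK | scheduler.py | _calculate_continuity_penalty
-- ===== SOURCE A (Python) =====
-- def _calculate_continuity_penalty(schedule_list):
--     local_penalty = 0
--     if not schedule_list:
--         return 0
--     sorted_schedule = sorted(schedule_list, key=lambda x: (x[0], x[1]))
--     for k in range(len(sorted_schedule) - 1):
--         curr_class = sorted_schedule[k]
--         next_class = sorted_schedule[k + 1]
--         if curr_class[0] == next_class[0]:
--             if curr_class[1] == next_class[1]:
--                 local_penalty += 5000
--                 continue
--             gap = next_class[1] - curr_class[1] - 1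
--             if gap > 0:
--                 local_penalty += (10 * gap)
--             if gap == 0 and curr_class[2] != next_class[2]:
--                 local_penalty += 5
--     return local_penalty
-- ===== SOURCE B (Python) =====
-- def _calculate_continuity_penalty(schedule_list):
--     total = 0
--     for day in sorted({x[0] for x in schedule_list}):
--         day_classes = sorted([x for x in schedule_list if x[0] == day],
--                              key=lambda x: x[1])
--         for curr, nxt in zip(day_classes, day_classes[1:]):
--             if curr[1] == nxt[1]:
--                 total += 5000
--             else:
--                 gap = nxt[1] - curr[1] - 1
--                 if gap > 0:
--                     total += 10 * gap
--                 elif gap == 0 and curr[2] != nxt[2]: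
--                     total += 5
--     return total
-- ===== Notes on version B (the rewrite author's own statement) =====
-- stated objective: alternative
-- what changed: Instead of one global stable sort by (day, time) followed by a single indexed scan with a day-equality guard on every pair, B groups the classes by day (sorted distinct days, per-day filter), time-sorts each day's classes separately and sums the per-day consecutive-pair penalties, so no cross-day pair is ever examined.
import Mathlib
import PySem

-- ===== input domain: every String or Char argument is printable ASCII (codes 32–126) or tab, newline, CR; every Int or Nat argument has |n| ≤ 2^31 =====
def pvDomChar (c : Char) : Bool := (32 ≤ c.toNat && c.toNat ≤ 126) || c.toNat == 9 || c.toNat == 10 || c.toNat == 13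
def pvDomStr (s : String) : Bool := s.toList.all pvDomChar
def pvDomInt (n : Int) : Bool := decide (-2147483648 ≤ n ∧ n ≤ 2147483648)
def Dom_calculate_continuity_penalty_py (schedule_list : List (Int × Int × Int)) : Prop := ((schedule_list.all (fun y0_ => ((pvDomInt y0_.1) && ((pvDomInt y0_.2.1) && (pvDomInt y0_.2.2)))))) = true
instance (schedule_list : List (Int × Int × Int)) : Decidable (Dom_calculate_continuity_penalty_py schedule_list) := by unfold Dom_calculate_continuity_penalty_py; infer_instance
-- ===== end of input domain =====

-- B replaces A's global (day, time) sort + single indexed scan by grouping the classes per day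
-- (sorted distinct days, then a per-day time-sort and a pass over consecutive pairs); objective: alternative decomposition.

-- ===== PORT A =====
def calculate_continuity_penalty_py (schedule_list : List (Int × Int × Int)) : Int :=
  if schedule_list = [] then 0
  else
    let sorted_schedule := PySem.List.sorted2 schedule_list (fun x => x.1) (fun x => x.2.1)
    (PySem.List.pyRange 0 ((sorted_schedule.length : Int) - 1) 1).foldl (fun local_penalty k =>
      let curr_class := PySem.List.pyGetD sorted_schedule k (0, 0, 0)
      let next_class := PySem.List.pyGetD sorted_schedule (k + 1) (0, 0, 0)
      if curr_class.1 = next_class.1 then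
        if curr_class.2.1 = next_class.2.1 then local_penalty + 5000
        else
          let gap := next_class.2.1 - curr_class.2.1 - 1
          let local_penalty := if gap > 0 then local_penalty + 10 * gap else local_penalty
          if gap = 0 ∧ curr_class.2.2 ≠ next_class.2.2 then local_penalty + 5 else local_penalty
      else local_penalty) 0

-- ===== PORT B =====
def calculate_continuity_penalty_py_alt (schedule_list : List (Int × Int × Int)) : Int :=
  (PySem.List.sorted (PySem.Set.ofList (schedule_list.map (fun x => x.1))) (fun d => d)).foldl
    (fun total day =>
      let day_classes := PySem.List.sorted (schedule_list.filter (fun x => decide (x.1 = day))) (fun x => x.2.1)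
      (List.zip day_classes (PySem.List.slice day_classes (some 1) none)).foldl (fun total p =>
        if p.1.2.1 = p.2.2.1 then total + 5000
        else
          let gap := p.2.2.1 - p.1.2.1 - 1
          if gap > 0 then total + 10 * gap
          else if gap = 0 ∧ p.1.2.2 ≠ p.2.2.2 then total + 5
          else total) total) 0

-- ===== PRECONDITION & SPEC =====
def Spec_calculate_continuity_penalty_py (schedule_list : List (Int × Int × Int)) (out : Int) : Prop := out = calculate_continuity_penalty_py_alt schedule_list
instance (schedule_list : List (Int × Int × Int)) (out : Int) : Decidable (Spec_calculate_continuity_penalty_py schedule_list out) := by unfold Spec_calculate_continuity_penalty_py; infer_instance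

-- ===== CLAIM (what is proved, stated in full; the proofs are below) =====
def Claim_equal_calculate_continuity_penalty_py : Prop := ∀ (schedule_list : List (Int × Int × Int)), Dom_calculate_continuity_penalty_py schedule_list → Spec_calculate_continuity_penalty_py schedule_list (calculate_continuity_penalty_py schedule_list)

-- ===== LEMMAS AND PROOFS =====
def pvBefore2 (a b : Int × Int × Int) : Bool :=
  decide (a.1 < b.1) || (!decide (b.1 < a.1) && decide (a.2.1 < b.2.1))
def pvBeforeT (a b : Int × Int × Int) : Bool := decide (a.2.1 < b.2.1)

lemma pvPairwise_insert2 (x : Int × Int × Int) (ys : List (Int × Int × Int))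
    (h : ys.Pairwise (fun a b => a.1 ≤ b.1)) :
    (PySem.List.insertBy pvBefore2 x ys).Pairwise (fun a b => a.1 ≤ b.1) := by
  induction ys with
  | nil => simp [PySem.List.insertBy]
  | cons y t ih =>
    rw [List.pairwise_cons] at h
    obtain ⟨hy, ht⟩ := h
    show (if pvBefore2 x y then x :: y :: t else y :: PySem.List.insertBy pvBefore2 x t).Pairwise _
    by_cases hb : pvBefore2 x y = true
    · rw [if_pos hb]
      have hxy : x.1 ≤ y.1 := by
        simp only [pvBefore2, Bool.or_eq_true, Bool.and_eq_true, Bool.not_eq_true',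
          decide_eq_true_eq, decide_eq_false_iff_not] at hb
        omega
      refine List.Pairwise.cons ?_ (List.Pairwise.cons hy ht)
      intro z hz
      rcases List.mem_cons.mp hz with rfl | hz
      · exact hxy
      · exact le_trans hxy (hy _ hz)
    · rw [if_neg hb]
      have hyx : y.1 ≤ x.1 := by
        simp only [pvBefore2, Bool.or_eq_true, Bool.and_eq_true, Bool.not_eq_true',
          decide_eq_true_eq, decide_eq_false_iff_not, not_or, not_and] at hb
        omega
      refine List.Pairwise.cons ?_ (ih ht)
      intro z hz
      rw [PySem.List.mem_insertBy] at hz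
      rcases hz with rfl | hz
      · exact hyx
      · exact hy _ hz

lemma pvFilter_insert2 (e : Int) (x : Int × Int × Int) (ys : List (Int × Int × Int))
    (h : ys.Pairwise (fun a b => a.1 ≤ b.1)) :
    (PySem.List.insertBy pvBefore2 x ys).filter (fun z => decide (z.1 = e)) =
      if x.1 = e then PySem.List.insertBy pvBeforeT x (ys.filter (fun z => decide (z.1 = e)))
      else ys.filter (fun z => decide (z.1 = e)) := by
  induction ys with
  | nil => by_cases hx : x.1 = e <;> simp [PySem.List.insertBy, hx]
  | cons y t ih =>
    rw [List.pairwise_cons] at h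
    obtain ⟨hy, ht⟩ := h
    show (if pvBefore2 x y then x :: y :: t else y :: PySem.List.insertBy pvBefore2 x t).filter _ = _
    by_cases hb : pvBefore2 x y = true
    · -- x goes in front
      rw [if_pos hb]
      simp only [pvBefore2, Bool.or_eq_true, Bool.and_eq_true, Bool.not_eq_true',
        decide_eq_true_eq, decide_eq_false_iff_not] at hb
      by_cases hx : x.1 = e
      · simp only [if_pos hx]
        by_cases hxy : x.1 < y.1
        · -- every element of y :: t has day > e, so the filter of y :: t is empty
          have hnil : (y :: t).filter (fun z => decide (z.1 = e)) = [] := by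
            rw [List.filter_eq_nil_iff]
            intro z hz
            have : y.1 ≤ z.1 := by
              rcases List.mem_cons.mp hz with rfl | hz
              · exact le_refl _
              · exact hy _ hz
            simp only [decide_eq_true_eq]
            omega
          rw [show ((x :: y :: t).filter (fun z => decide (z.1 = e))) =
                x :: (y :: t).filter (fun z => decide (z.1 = e)) by simp [hx], hnil]
          simp [PySem.List.insertBy]
        · -- then y.1 = x.1 = e and x.2.1 < y.2.1
          have hyd : y.1 = e := by omega
          have hxy2 : x.2.1 < y.2.1 := by
            rcases hb with hb | hb
            · omega
            · exact hb.2
          simp only [List.filter_cons, hx, hyd, decide_true, if_true]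
          show x :: y :: _ = PySem.List.insertBy pvBeforeT x (y :: _)
          show _ = if pvBeforeT x y then _ else _
          simp [pvBeforeT, hxy2]
      · simp only [if_neg hx]
        simp [List.filter_cons, hx]
    · -- x goes further in
      rw [if_neg hb]
      have hyx : y.1 ≤ x.1 ∧ (y.1 < x.1 ∨ ¬ x.2.1 < y.2.1) := by
        simp only [pvBefore2, Bool.or_eq_true, Bool.and_eq_true, Bool.not_eq_true',
          decide_eq_true_eq, decide_eq_false_iff_not, not_or, not_and] at hb
        constructor
        · omega
        · by_cases hlt : y.1 < x.1
          · exact Or.inl hlt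
          · exact Or.inr (by
              have := hb.2
              intro hc
              omega)
      by_cases hyd : y.1 = e
      · simp only [List.filter_cons, hyd, decide_true, if_true]
        rw [ih ht]
        by_cases hx : x.1 = e
        · simp only [if_pos hx]
          have hnb : ¬ x.2.1 < y.2.1 := by
            rcases hyx.2 with h1 | h1
            · omega
            · exact h1
          show _ = if pvBeforeT x y then _ else _
          simp [pvBeforeT, hnb]
        · simp [if_neg hx]
      · simp only [List.filter_cons, ih ht]
        simp [hyd]

lemma pvFoldl_pairwise (l : List (Int × Int × Int)) : ∀ acc, acc.Pairwise (fun a b => a.1 ≤ b.1) →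
    (l.foldl (fun acc x => PySem.List.insertBy pvBefore2 x acc) acc).Pairwise (fun a b => a.1 ≤ b.1) := by
  induction l with
  | nil => intro acc h; simpa using h
  | cons x t ih => intro acc h; exact ih _ (pvPairwise_insert2 x acc h)

lemma pvFoldl_filter (e : Int) (l : List (Int × Int × Int)) : ∀ acc, acc.Pairwise (fun a b => a.1 ≤ b.1) →
    (l.foldl (fun acc x => PySem.List.insertBy pvBefore2 x acc) acc).filter (fun z => decide (z.1 = e)) =
      (l.filter (fun z => decide (z.1 = e))).foldl (fun acc x => PySem.List.insertBy pvBeforeT x acc)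
        (acc.filter (fun z => decide (z.1 = e))) := by
  induction l with
  | nil => intro acc h; simp
  | cons x t ih =>
    intro acc h
    simp only [List.foldl_cons, List.filter_cons]
    by_cases hx : x.1 = e
    · rw [ih _ (pvPairwise_insert2 x acc h), pvFilter_insert2 e x acc h, if_pos hx]
      simp [hx]
    · rw [ih _ (pvPairwise_insert2 x acc h), pvFilter_insert2 e x acc h, if_neg hx]
      simp [hx]

lemma pvSorted2_filter (l : List (Int × Int × Int)) (e : Int) :
    (PySem.List.sorted2 l (fun x => x.1) (fun x => x.2.1)).filter (fun z => decide (z.1 = e)) =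
      PySem.List.sorted (l.filter (fun z => decide (z.1 = e))) (fun x => x.2.1) := by
  have h1 : PySem.List.sorted2 l (fun x => x.1) (fun x => x.2.1) =
      l.foldl (fun acc x => PySem.List.insertBy pvBefore2 x acc) [] := rfl
  have h2 : PySem.List.sorted (l.filter (fun z => decide (z.1 = e))) (fun x => x.2.1) =
      (l.filter (fun z => decide (z.1 = e))).foldl (fun acc x => PySem.List.insertBy pvBeforeT x acc) [] := rfl
  rw [h1, h2, pvFoldl_filter e l [] (by simp)]
  simp

lemma pvSorted2_day_pairwise (l : List (Int × Int × Int)) :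
    (PySem.List.sorted2 l (fun x => x.1) (fun x => x.2.1)).Pairwise (fun a b => a.1 ≤ b.1) := by
  exact pvFoldl_pairwise l [] (by simp)

lemma pvSplit_min (d : Int) (S : List (Int × Int × Int))
    (hs : S.Pairwise (fun a b => a.1 ≤ b.1)) (hmin : ∀ x ∈ S, d ≤ x.1) :
    S = S.filter (fun z => decide (z.1 = d)) ++ S.filter (fun z => decide (z.1 ≠ d)) := by
  induction S with
  | nil => simp
  | cons x T ih =>
    rw [List.pairwise_cons] at hs
    obtain ⟨hx, hT⟩ := hs
    by_cases hxd : x.1 = d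
    · simp only [List.filter_cons, hxd, decide_true, if_true]
      have := ih hT (fun z hz => hmin z (List.mem_cons_of_mem _ hz))
      simp only [decide_not, decide_true, Bool.not_true, Bool.false_eq_true, if_false] at this ⊢
      rw [List.cons_append]
      exact congrArg (x :: ·) this
    · have hdx : d < x.1 := lt_of_le_of_ne (hmin x (List.mem_cons_self)) (Ne.symm hxd)
      have hnil : (x :: T).filter (fun z => decide (z.1 = d)) = [] := by
        rw [List.filter_eq_nil_iff]
        intro z hz
        rcases List.mem_cons.mp hz with rfl | hz
        · simp; omega
        · have := hx z hz; simp; omega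
      have hall : (x :: T).filter (fun z => decide (z.1 ≠ d)) = x :: T := by
        rw [List.filter_eq_self]
        intro z hz
        rcases List.mem_cons.mp hz with rfl | hz
        · simp [hxd]
        · have := hx z hz; simp; omega
      rw [hnil, hall, List.nil_append]

lemma pvFlatten_filter (days : List Int) : ∀ (S : List (Int × Int × Int)),
    days.Pairwise (· < ·) → S.Pairwise (fun a b => a.1 ≤ b.1) →
    (∀ x ∈ S, x.1 ∈ days) →
    S = (days.map (fun e => S.filter (fun z => decide (z.1 = e)))).flatten := by
  induction days with
  | nil => intro S _ _ hmem; simp [List.eq_nil_iff_forall_not_mem.mpr (fun x hx => by simpa using hmem x hx)]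
  | cons d rest ih =>
    intro S hd hs hmem
    rw [List.pairwise_cons] at hd
    obtain ⟨hdlt, hrest⟩ := hd
    have hmin : ∀ x ∈ S, d ≤ x.1 := by
      intro x hx
      rcases List.mem_cons.mp (hmem x hx) with h | h
      · omega
      · exact le_of_lt (hdlt _ h)
    simp only [List.map_cons, List.flatten_cons]
    have hsplit := pvSplit_min d S hs hmin
    set S' := S.filter (fun z => decide (z.1 ≠ d)) with hS'
    have hS'sub : ∀ x ∈ S', x ∈ S := fun x hx => List.mem_of_mem_filter hx
    have h1 : ∀ e ∈ rest, S.filter (fun z => decide (z.1 = e)) = S'.filter (fun z => decide (z.1 = e)) := by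
      intro e he
      rw [hS', List.filter_filter]
      apply List.filter_congr
      intro z hz
      by_cases hze : z.1 = e
      · have h3 : z.1 ≠ d := by have := hdlt e he; omega
        have hed : ¬ e = d := by omega
        simp [hze, hed]
      · simp [hze]
    have h2 : S' = (rest.map (fun e => S'.filter (fun z => decide (z.1 = e)))).flatten := by
      apply ih S' hrest (List.Pairwise.sublist List.filter_sublist hs)
      intro x hx
      have hxS : x ∈ S := hS'sub x hx
      have : x.1 ≠ d := by
        have := (List.mem_filter.mp hx).2
        simpa using this
      rcases List.mem_cons.mp (hmem x hxS) with h | h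
      · exact absurd h this
      · exact h
    calc S = S.filter (fun z => decide (z.1 = d)) ++ S' := hsplit
    _ = S.filter (fun z => decide (z.1 = d)) ++ (rest.map (fun e => S'.filter (fun z => decide (z.1 = e)))).flatten := by rw [← h2]
    _ = S.filter (fun z => decide (z.1 = d)) ++ (rest.map (fun e => S.filter (fun z => decide (z.1 = e)))).flatten := by
          congr 1; congr 1; exact (List.map_congr_left (fun e he => (h1 e he).symm))

def pvStepA (a b : Int × Int × Int) : Int :=
  if a.1 = b.1 then
    if a.2.1 = b.2.1 then 5000
    else (if b.2.1 - a.2.1 - 1 > 0 then 10 * (b.2.1 - a.2.1 - 1) else 0) +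
         (if b.2.1 - a.2.1 - 1 = 0 ∧ a.2.2 ≠ b.2.2 then 5 else 0)
  else 0

def pvStepB (a b : Int × Int × Int) : Int :=
  if a.2.1 = b.2.1 then 5000
  else if b.2.1 - a.2.1 - 1 > 0 then 10 * (b.2.1 - a.2.1 - 1)
  else if b.2.1 - a.2.1 - 1 = 0 ∧ a.2.2 ≠ b.2.2 then 5
  else 0

def pvPen (f : (Int × Int × Int) → (Int × Int × Int) → Int) : List (Int × Int × Int) → Int
  | [] => 0
  | [_] => 0
  | a :: b :: t => f a b + pvPen f (b :: t)

lemma pvPen_append (f : (Int × Int × Int) → (Int × Int × Int) → Int)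
    (A B : List (Int × Int × Int)) :
    pvPen f (A ++ B) = pvPen f A +
      (match A.getLast?, B.head? with
       | some a, some b => f a b
       | _, _ => 0) + pvPen f B := by
  induction A with
  | nil => simp [pvPen]
  | cons a A ih =>
    cases A with
    | nil =>
      cases B with
      | nil => simp [pvPen]
      | cons b t => simp [pvPen]
    | cons a2 T =>
      have h1 : ((a :: a2 :: T) ++ B) = a :: ((a2 :: T) ++ B) := rfl
      rw [h1]
      have h2 : (a2 :: T) ++ B = a2 :: (T ++ B) := rfl
      show f a a2 + pvPen f ((a2 :: T) ++ B) = _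
      rw [ih]
      have h3 : (a :: a2 :: T).getLast? = (a2 :: T).getLast? := by
        simp [List.getLast?_cons_cons]
      rw [h3]
      show _ = f a a2 + pvPen f (a2 :: T) + _ + _
      ring

lemma pvPen_eq_pen2 (d : Int) (l : List (Int × Int × Int)) (h : ∀ x ∈ l, x.1 = d) :
    pvPen pvStepA l = pvPen pvStepB l := by
  induction l with
  | nil => rfl
  | cons a t ih =>
    cases t with
    | nil => rfl
    | cons b T =>
      show pvStepA a b + _ = pvStepB a b + _
      have hab : a.1 = b.1 := by
        rw [h a List.mem_cons_self, h b (List.mem_cons_of_mem _ List.mem_cons_self)]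
      rw [show pvStepA a b = pvStepB a b by simp only [pvStepA, pvStepB, if_pos hab]; split_ifs <;> omega]
      rw [ih (fun x hx => h x (List.mem_cons_of_mem _ hx))]

lemma pvPen_flatten (days : List Int) (g : Int → List (Int × Int × Int))
    (hd : days.Pairwise (· < ·)) (hg : ∀ e, ∀ x ∈ g e, x.1 = e) :
    pvPen pvStepA ((days.map g).flatten) = (days.map (fun e => pvPen pvStepB (g e))).sum := by
  induction days with
  | nil => rfl
  | cons d rest ih =>
    rw [List.pairwise_cons] at hd
    obtain ⟨hdlt, hrest⟩ := hd
    simp only [List.map_cons, List.flatten_cons, List.sum_cons]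
    rw [pvPen_append]
    have hcross : (match (g d).getLast?, ((rest.map g).flatten).head? with
       | some a, some b => pvStepA a b
       | _, _ => 0) = 0 := by
      rcases hl : (g d).getLast? with _ | a
      · rfl
      rcases hh : ((rest.map g).flatten).head? with _ | b
      · rfl
      have ha : a ∈ g d := List.mem_of_getLast? hl
      have hb : b ∈ (rest.map g).flatten := List.mem_of_mem_head? (by rw [hh]; rfl)
      rw [List.mem_flatten] at hb
      obtain ⟨L, hL, hbL⟩ := hb
      rw [List.mem_map] at hL
      obtain ⟨e, he, rfl⟩ := hL
      have hbe : b.1 = e := hg e b hbL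
      have had : a.1 = d := hg d a ha
      have hne : a.1 ≠ b.1 := by have := hdlt e he; omega
      simp [pvStepA, hne]
    rw [hcross, pvPen_eq_pen2 d (g d) (hg d), ih hrest]
    ring

lemma pvSum_adj (f : (Int × Int × Int) → (Int × Int × Int) → Int) (S : List (Int × Int × Int)) :
    ((List.range (S.length - 1)).map
      (fun k => f (S.getD k (0,0,0)) (S.getD (k+1) (0,0,0)))).sum = pvPen f S := by
  induction S with
  | nil => rfl
  | cons a T ih =>
    cases T with
    | nil => rfl
    | cons b t =>
      have hlen : (a :: b :: t).length - 1 = (b :: t).length := by simp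
      rw [hlen]
      have hlen2 : (b :: t).length = ((b :: t).length - 1) + 1 := by simp
      rw [hlen2, List.range_succ_eq_map]
      simp only [List.map_cons, List.map_map, List.sum_cons]
      show f a b + _ = pvPen f (a :: b :: t)
      rw [show pvPen f (a :: b :: t) = f a b + pvPen f (b :: t) from rfl, ← ih]
      rfl

lemma pvA_eq_pen (l : List (Int × Int × Int)) :
    calculate_continuity_penalty_py l =
      pvPen pvStepA (PySem.List.sorted2 l (fun x => x.1) (fun x => x.2.1)) := by
  unfold calculate_continuity_penalty_py
  by_cases hl : l = []
  · subst hl; rfl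
  · rw [if_neg hl]
    set S := PySem.List.sorted2 l (fun x => x.1) (fun x => x.2.1) with hS
    show (PySem.List.pyRange 0 ((S.length : Int) - 1) 1).foldl (fun local_penalty k =>
        let curr_class := PySem.List.pyGetD S k (0, 0, 0)
        let next_class := PySem.List.pyGetD S (k + 1) (0, 0, 0)
        if curr_class.1 = next_class.1 then
          if curr_class.2.1 = next_class.2.1 then local_penalty + 5000
          else
            let gap := next_class.2.1 - curr_class.2.1 - 1
            let local_penalty := if gap > 0 then local_penalty + 10 * gap else local_penalty
            if gap = 0 ∧ curr_class.2.2 ≠ next_class.2.2 then local_penalty + 5 else local_penalty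
        else local_penalty) 0 = pvPen pvStepA S
    have hfun : (fun (local_penalty : Int) (k : Int) =>
        let curr_class := PySem.List.pyGetD S k (0, 0, 0)
        let next_class := PySem.List.pyGetD S (k + 1) (0, 0, 0)
        if curr_class.1 = next_class.1 then
          if curr_class.2.1 = next_class.2.1 then local_penalty + 5000
          else
            let gap := next_class.2.1 - curr_class.2.1 - 1
            let local_penalty := if gap > 0 then local_penalty + 10 * gap else local_penalty
            if gap = 0 ∧ curr_class.2.2 ≠ next_class.2.2 then local_penalty + 5 else local_penalty
        else local_penalty) =
        (fun local_penalty k => local_penalty +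
          pvStepA (PySem.List.pyGetD S k (0, 0, 0)) (PySem.List.pyGetD S (k + 1) (0, 0, 0))) := by
      funext lp k
      simp only [pvStepA]
      split_ifs <;> ring
    rw [hfun, PySem.List.foldl_add]
    rw [PySem.List.pyRange_one]
    simp only [List.map_map, sub_zero]
    have hcast : (((S.length : Int) - 1)).toNat = S.length - 1 := by omega
    rw [hcast]
    rw [← pvSum_adj pvStepA S, zero_add]
    congr 1
    apply List.map_congr_left
    intro k hk
    rw [List.mem_range] at hk
    simp only [Function.comp]
    have h1 : PySem.List.pyGetD S ((0 : Int) + (k : Int)) (0,0,0) = S.getD k (0,0,0) := by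
      rw [zero_add, PySem.List.pyGetD_natCast]
    have h2 : PySem.List.pyGetD S ((0 : Int) + (k : Int) + 1) (0,0,0) = S.getD (k+1) (0,0,0) := by
      rw [zero_add, show ((k : Int) + 1) = ((k + 1 : Nat) : Int) by push_cast; ring, PySem.List.pyGetD_natCast]
    rw [h1, h2]

lemma pvZip_eq_pen (dc : List (Int × Int × Int)) (init : Int) :
    (List.zip dc (PySem.List.slice dc (some 1) none)).foldl (fun total p =>
        if p.1.2.1 = p.2.2.1 then total + 5000
        else
          let gap := p.2.2.1 - p.1.2.1 - 1
          if gap > 0 then total + 10 * gap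
          else if gap = 0 ∧ p.1.2.2 ≠ p.2.2.2 then total + 5
          else total) init = init + pvPen pvStepB dc := by
  rw [PySem.List.slice_from_one]
  have hfun : (fun (total : Int) (p : (Int × Int × Int) × (Int × Int × Int)) =>
      if p.1.2.1 = p.2.2.1 then total + 5000
      else
        let gap := p.2.2.1 - p.1.2.1 - 1
        if gap > 0 then total + 10 * gap
        else if gap = 0 ∧ p.1.2.2 ≠ p.2.2.2 then total + 5
        else total) = (fun total p => total + pvStepB p.1 p.2) := by
    funext total p
    simp only [pvStepB]
    split_ifs <;> ring
  rw [hfun, PySem.List.foldl_add]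
  congr 1
  induction dc with
  | nil => rfl
  | cons a T ih =>
    cases T with
    | nil => rfl
    | cons b t =>
      show pvStepB a b + _ = pvStepB a b + _
      rw [← ih]
      rfl

lemma pvB_eq_sum (l : List (Int × Int × Int)) :
    calculate_continuity_penalty_py_alt l =
      ((PySem.List.sorted (PySem.Set.ofList (l.map (fun x => x.1))) (fun d => d)).map
        (fun e => pvPen pvStepB (PySem.List.sorted (l.filter (fun z => decide (z.1 = e))) (fun x => x.2.1)))).sum := by
  unfold calculate_continuity_penalty_py_alt
  have hfun : (fun (total : Int) (day : Int) =>
      let day_classes := PySem.List.sorted (l.filter (fun x => decide (x.1 = day))) (fun x => x.2.1)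
      (List.zip day_classes (PySem.List.slice day_classes (some 1) none)).foldl (fun total p =>
        if p.1.2.1 = p.2.2.1 then total + 5000
        else
          let gap := p.2.2.1 - p.1.2.1 - 1
          if gap > 0 then total + 10 * gap
          else if gap = 0 ∧ p.1.2.2 ≠ p.2.2.2 then total + 5
          else total) total) =
      (fun total day => total + pvPen pvStepB (PySem.List.sorted (l.filter (fun z => decide (z.1 = day))) (fun x => x.2.1))) := by
    funext total day
    exact pvZip_eq_pen _ total
  rw [hfun, PySem.List.foldl_add, zero_add]


-- ===== VERDICT (by name: the statement is the Claim_ definition above) =====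
theorem calculate_continuity_penalty_py_spec : Claim_equal_calculate_continuity_penalty_py := by
  intro l _
  show calculate_continuity_penalty_py l = calculate_continuity_penalty_py_alt l
  rw [pvA_eq_pen, pvB_eq_sum]
  set S := PySem.List.sorted2 l (fun x => x.1) (fun x => x.2.1) with hS
  set days := PySem.List.sorted (PySem.Set.ofList (l.map (fun x => x.1))) (fun d => d) with hdays
  have hd : days.Pairwise (· < ·) := PySem.List.sorted_ofList_pairwise_lt _
  have hmem : ∀ x ∈ S, x.1 ∈ days := by
    intro x hx
    have hxl : x ∈ l := (PySem.List.sorted2_perm l _ _ _).mem_iff.mp hx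
    rw [hdays, PySem.List.mem_sorted, PySem.Set.mem_ofList]
    exact List.mem_map_of_mem hxl
  have hflat := pvFlatten_filter days S hd (pvSorted2_day_pairwise l) hmem
  rw [show pvPen pvStepA S = pvPen pvStepA ((days.map (fun e => S.filter (fun z => decide (z.1 = e)))).flatten) from by rw [← hflat]]
  rw [pvPen_flatten days _ hd (by
    intro e x hx
    have := (List.mem_filter.mp hx).2
    simpa using this)]
  congr 1
  apply List.map_congr_left
  intro e _
  rw [← pvSorted2_filter l e]
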